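-- pv_equiv track=rewrite | github.com/fberrabah/Jeu_du_pendu | functions.py | affiche_lettres_trouvees
-- ===== SOURCE A (Python) =====
-- def affiche_lettres_trouvees(positions, mot_a_trouver):
--     mot_a_aficher = ""
--     position_actuelle = 0
--     for lettre_mot in mot_a_trouver:
--         if position_actuelle in positions :
--             mot_a_aficher += lettre_mot
--         else:
--             mot_a_aficher += "#"
--         position_actuelle += 1
--
--     return mot_a_aficher
-- ===== SOURCE B (Python) =====
-- def affiche_lettres_trouvees(positions, mot_a_trouver):
--     result = ['#'] * len(mot_a_trouver)
--     for p in positions: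
--         if 0 <= p < len(mot_a_trouver):
--             result[p] = mot_a_trouver[p]
--     return ''.join(result)
-- ===== Notes on version B (the rewrite author's own statement) =====
-- stated objective: faster
-- what changed: B fills a '#' buffer and loops over the found positions (ignoring out-of-range ones), writing the word's letter at each, instead of scanning the word and testing membership in positions for every character.
import Mathlib
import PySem

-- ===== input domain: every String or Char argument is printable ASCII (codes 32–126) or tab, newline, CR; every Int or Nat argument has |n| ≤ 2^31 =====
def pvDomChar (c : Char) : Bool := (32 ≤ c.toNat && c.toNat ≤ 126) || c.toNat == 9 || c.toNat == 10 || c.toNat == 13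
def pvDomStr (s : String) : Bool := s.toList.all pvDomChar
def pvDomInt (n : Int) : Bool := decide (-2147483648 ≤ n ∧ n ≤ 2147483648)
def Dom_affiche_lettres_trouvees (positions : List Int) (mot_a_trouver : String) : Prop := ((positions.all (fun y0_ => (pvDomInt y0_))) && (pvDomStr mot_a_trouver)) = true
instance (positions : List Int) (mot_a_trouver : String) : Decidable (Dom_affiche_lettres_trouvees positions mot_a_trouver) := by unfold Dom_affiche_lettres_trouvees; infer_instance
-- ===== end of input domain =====

-- B rewrites A by filling a '#' buffer and looping over the positions instead of
-- scanning the word and testing membership per character (alternative decomposition).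
-- ===== PORT A =====
-- A scans the word, appending the letter when the running counter is in `positions`,
-- else '#'.  The string accumulator is modeled as a List Char (append = Python +=).
def affiche_lettres_trouvees (positions : List Int) (mot_a_trouver : String) : String :=
  let st := mot_a_trouver.toList.foldl
    (fun (st : List Char × Int) lettre_mot =>
      if st.2 ∈ positions then (st.1 ++ [lettre_mot], st.2 + 1)
      else (st.1 ++ ['#'], st.2 + 1))
    ([], 0)
  String.mk st.1

-- ===== PORT B =====
-- B: result = ['#'] * len(word); for p in positions: if 0 <= p < len(word): result[p] = word[p];
-- return ''.join(result).  The guard 0 ≤ p makes `.toNat` exact here.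
def affiche_lettres_trouvees_alt (positions : List Int) (mot_a_trouver : String) : String :=
  let w := mot_a_trouver.toList
  let result := positions.foldl
    (fun (result : List Char) p =>
      if 0 ≤ p ∧ p < (w.length : Int) then result.set p.toNat (w.getD p.toNat '#')
      else result)
    (List.replicate w.length '#')
  String.mk result

-- ===== PRECONDITION & SPEC =====
def Spec_affiche_lettres_trouvees (positions : List Int) (mot_a_trouver : String) (out : String) : Prop := out = affiche_lettres_trouvees_alt positions mot_a_trouver
instance (positions : List Int) (mot_a_trouver : String) (out : String) : Decidable (Spec_affiche_lettres_trouvees positions mot_a_trouver out) := by unfold Spec_affiche_lettres_trouvees; infer_instance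

-- ===== CLAIM (what is proved, stated in full; the proofs are below) =====
def Claim_equal_affiche_lettres_trouvees : Prop := ∀ (positions : List Int) (mot_a_trouver : String), Dom_affiche_lettres_trouvees positions mot_a_trouver → Spec_affiche_lettres_trouvees positions mot_a_trouver (affiche_lettres_trouvees positions mot_a_trouver)

-- ===== LEMMAS AND PROOFS =====

-- Reference description of the output: character i is the word's letter iff i ∈ positions.
def pvMask (positions : List Int) : List Char → Int → List Char
  | [], _ => []
  | c :: cs, k => (if k ∈ positions then c else '#') :: pvMask positions cs (k + 1)

theorem pvMask_length (positions : List Int) (cs : List Char) (k : Int) :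
    (pvMask positions cs k).length = cs.length := by
  induction cs generalizing k with
  | nil => rfl
  | cons c cs ih => simp [pvMask, ih]

theorem pvMask_getElem (positions : List Int) (cs : List Char) (k : Int) (i : Nat)
    (h : i < cs.length) (h' : i < (pvMask positions cs k).length) :
    (pvMask positions cs k)[i] = if (k + (i : Int)) ∈ positions then cs[i] else '#' := by
  induction cs generalizing k i with
  | nil => simp at h
  | cons c cs ih =>
    cases i with
    | zero => simp [pvMask]
    | succ i =>
      have hi : i < cs.length := by simpa using h
      have := ih (k + 1) i hi (by simpa [pvMask_length] using hi)
      simp only [pvMask, List.getElem_cons_succ, this]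
      have : k + 1 + (i : Int) = k + ((i : Nat) + 1 : Nat) := by push_cast; ring
      rw [this]

-- A's fold produces the mask.
theorem fold_A_mask (positions : List Int) (cs : List Char) (k : Int) (acc : List Char) :
    (cs.foldl
      (fun (st : List Char × Int) lettre_mot =>
        if st.2 ∈ positions then (st.1 ++ [lettre_mot], st.2 + 1)
        else (st.1 ++ ['#'], st.2 + 1))
      (acc, k)).1 = acc ++ pvMask positions cs k := by
  induction cs generalizing k acc with
  | nil => simp [pvMask]
  | cons c cs ih =>
    by_cases h : k ∈ positions <;>
      simp [pvMask, h, List.foldl_cons, ih]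

-- B's fold: pointwise characterisation (buffer length is preserved, and cell i holds
-- the word's letter iff i occurs among the positions processed so far, else the old cell).
theorem fold_B_char (w : List Char) (ps : List Int) (b : List Char) (hb : b.length = w.length) :
    (ps.foldl
      (fun (result : List Char) p =>
        if 0 ≤ p ∧ p < (w.length : Int) then result.set p.toNat (w.getD p.toNat '#')
        else result) b).length = w.length ∧
    ∀ i : Nat, i < w.length →
      (ps.foldl
        (fun (result : List Char) p =>
          if 0 ≤ p ∧ p < (w.length : Int) then result.set p.toNat (w.getD p.toNat '#')
          else result) b).getD i '#' =
        if ((i : Int)) ∈ ps then w.getD i '#' else b.getD i '#' := by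
  induction ps generalizing b with
  | nil => simpa using hb
  | cons p ps ih =>
    have hb'len : (if 0 ≤ p ∧ p < (w.length : Int) then b.set p.toNat (w.getD p.toNat '#')
        else b).length = w.length := by split <;> simp [hb]
    obtain ⟨hlen, hget⟩ := ih _ hb'len
    have step : (List.foldl
        (fun (result : List Char) p =>
          if 0 ≤ p ∧ p < (w.length : Int) then result.set p.toNat (w.getD p.toNat '#')
          else result) b (p :: ps)) = (List.foldl
        (fun (result : List Char) p =>
          if 0 ≤ p ∧ p < (w.length : Int) then result.set p.toNat (w.getD p.toNat '#')
          else result)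
        (if 0 ≤ p ∧ p < (w.length : Int) then b.set p.toNat (w.getD p.toNat '#') else b) ps) :=
      rfl
    rw [step]
    refine ⟨hlen, ?_⟩
    intro i hi
    rw [hget i hi]
    by_cases hmem : ((i : Int)) ∈ ps
    · simp [hmem]
    · simp only [hmem, if_false, List.mem_cons, or_false]
      by_cases hip : ((i : Int)) = p
      · have hrange : 0 ≤ p ∧ p < (w.length : Int) := by
          constructor
          · exact hip ▸ (Int.natCast_nonneg i)
          · exact hip ▸ (by exact_mod_cast hi)
        have hpn : p.toNat = i := by omega
        have hib : i < b.length := by omega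
        simp [hrange, hpn, hip, List.getD_eq_getElem?_getD, hib]
      · simp only [hip, if_false, List.getD_eq_getElem?_getD]
        split
        · next hr =>
          have hne : p.toNat ≠ i := by omega
          simp [hne]
        · rfl

-- ===== VERDICT (by name: the statement is the Claim_ definition above) =====
theorem affiche_lettres_trouvees_spec : Claim_equal_affiche_lettres_trouvees := by
  intro positions mot _
  unfold Spec_affiche_lettres_trouvees affiche_lettres_trouvees affiche_lettres_trouvees_alt
  apply congrArg String.mk
  obtain ⟨hlen, hget⟩ := fold_B_char mot.toList positions
    (List.replicate mot.toList.length '#') (by simp)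
  rw [fold_A_mask]
  apply List.ext_getElem
  · simpa [pvMask_length] using hlen.symm
  · intro i h1 h2
    have hi : i < mot.toList.length := by simpa [pvMask_length] using h1
    have hB := hget i hi
    rw [List.getD_eq_getElem _ _ h2] at hB
    simp only [List.nil_append]
    rw [pvMask_getElem positions mot.toList 0 i hi (by simpa using h1), hB]
    by_cases hmem : ((i : Int)) ∈ positions
    · simp [hmem, List.getElem?_eq_getElem hi]
    · simp [hmem]
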